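-- pv_equiv track=rewrite | github.com/charlesmerritt/balatrobot-mdp | src/balatrobot/hand_evaluator.py | _find_best_straight_indices
-- ===== SOURCE A (Python) =====
-- RANK_VALUES = {
--     "2": 2,
--     "3": 3,
--     "4": 4,
--     "5": 5,
--     "6": 6,
--     "7": 7,
--     "8": 8,
--     "9": 9,
--     "10": 10,
--     "Jack": 11,
--     "Queen": 12,
--     "King": 13,
--     "Ace": 14,
-- }
--
-- VALUE_TO_RANK = {value: rank for rank, value in RANK_VALUES.items()}
--
-- def _find_best_straight_indices(
--     rank_to_indices: dict[str, list[int]],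
--     subset_indices: list[int] | None = None,
-- ) -> tuple[int, list[int]]:
--     """Return the length and indices of the best straight (>=3 cards)."""
--
--     value_rank_pairs = []
--     for rank, indices in rank_to_indices.items():
--         filtered = [i for i in indices if subset_indices is None or i in subset_indices]
--         if not filtered:
--             continue
--         value = RANK_VALUES.get(rank)
--         if value is None:
--             continue
--         value_rank_pairs.append((value, rank))
--
--     if not value_rank_pairs:
--         return 0, []
--
--     values = sorted({value for value, _ in value_rank_pairs})
--     best_sequence = _longest_consecutive_sequence(values)
--
--     # Handle Ace-low straights
--     if 14 in values:
--         ace_low_values = sorted(set(values + [1]))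
--         ace_sequence = _longest_consecutive_sequence(ace_low_values)
--         if len(ace_sequence) > len(best_sequence):
--             best_sequence = [14 if v == 1 else v for v in ace_sequence]
--
--     if len(best_sequence) < 3:
--         return len(best_sequence), []
--
--     indices: list[int] = []
--     used_indices: set[int] = set()
--     for value in best_sequence:
--         rank = _value_to_rank(value)
--         if not rank or rank not in rank_to_indices:
--             continue
--         for idx in rank_to_indices[rank]:
--             if idx in used_indices:
--                 continue
--             if subset_indices is not None and idx not in subset_indices:
--                 continue
--             indices.append(idx)
--             used_indices.add(idx)
--             break
--
--     return len(best_sequence), indices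
--
-- def _longest_consecutive_sequence(values: list[int]) -> list[int]:
--     if not values:
--         return []
--
--     best = current = [values[0]]
--     for value in values[1:]:
--         if value == current[-1]:
--             continue
--         if value == current[-1] + 1:
--             current.append(value)
--         else:
--             if len(current) > len(best):
--                 best = current[:]
--             current = [value]
--     if len(current) > len(best):
--         best = current
--     return best
--
-- def _value_to_rank(value: int) -> str | None:
--     if value == 1:
--         return "Ace"
--     return VALUE_TO_RANK.get(value)
-- ===== SOURCE B (Python) =====
-- RANK_VALUES = {
--     "2": 2, "3": 3, "4": 4, "5": 5, "6": 6, "7": 7, "8": 8, "9": 9,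
--     "10": 10, "Jack": 11, "Queen": 12, "King": 13, "Ace": 14,
-- }
--
-- VALUE_TO_RANK = {value: rank for rank, value in RANK_VALUES.items()}
--
--
-- def _find_best_straight_indices(rank_to_indices, subset_indices=None):
--     """Hash-set run-start algorithm: no sorting, runs measured directly from the set."""
--     present = set()
--     for rank, idxs in rank_to_indices.items():
--         value = RANK_VALUES.get(rank)
--         if value is not None and any(
--             subset_indices is None or i in subset_indices for i in idxs
--         ):
--             present.add(value)
--
--     if not present:
--         return 0, []
--
--     best_start, best_len = _best_run(present)
--
--     # Ace-low straights: retry with 1 added, adopt only a strictly longer run.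
--     if 14 in present:
--         low_start, low_len = _best_run(present | {1})
--         if low_len > best_len:
--             best_start, best_len = low_start, low_len
--
--     if best_len < 3:
--         return best_len, []
--
--     indices = []
--     used = set()
--     for value in range(best_start, best_start + best_len):
--         rank = "Ace" if value == 1 else VALUE_TO_RANK.get(value)
--         idx = next(
--             (i for i in rank_to_indices.get(rank, [])
--              if i not in used and (subset_indices is None or i in subset_indices)),
--             None,
--         )
--         if idx is not None:
--             indices.append(idx)
--             used.add(idx)
--     return best_len, indices
--
--
-- def _best_run(vals):
--     """Lowest-starting run of maximal length in the set of values."""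
--     best_start, best_len = 0, 0
--     for v in vals:
--         if v - 1 not in vals:
--             n = 1
--             while v + n in vals:
--                 n += 1
--             if n > best_len or (n == best_len and v < best_start):
--                 best_len, best_start = n, v
--     return best_start, best_len
-- ===== Notes on version B (the rewrite author's own statement) =====
-- stated objective: alternative
-- what changed: Replaces A's sort-then-linear-scan longest-consecutive-sequence helper with a hash-set run-start algorithm: for each present value whose predecessor is absent, count forward in the set to measure that run, keeping the longest (lowest-starting on ties); no sorting and no explicit sequence lists are built, the winning straight is reconstructed as a range.
import Mathlib
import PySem

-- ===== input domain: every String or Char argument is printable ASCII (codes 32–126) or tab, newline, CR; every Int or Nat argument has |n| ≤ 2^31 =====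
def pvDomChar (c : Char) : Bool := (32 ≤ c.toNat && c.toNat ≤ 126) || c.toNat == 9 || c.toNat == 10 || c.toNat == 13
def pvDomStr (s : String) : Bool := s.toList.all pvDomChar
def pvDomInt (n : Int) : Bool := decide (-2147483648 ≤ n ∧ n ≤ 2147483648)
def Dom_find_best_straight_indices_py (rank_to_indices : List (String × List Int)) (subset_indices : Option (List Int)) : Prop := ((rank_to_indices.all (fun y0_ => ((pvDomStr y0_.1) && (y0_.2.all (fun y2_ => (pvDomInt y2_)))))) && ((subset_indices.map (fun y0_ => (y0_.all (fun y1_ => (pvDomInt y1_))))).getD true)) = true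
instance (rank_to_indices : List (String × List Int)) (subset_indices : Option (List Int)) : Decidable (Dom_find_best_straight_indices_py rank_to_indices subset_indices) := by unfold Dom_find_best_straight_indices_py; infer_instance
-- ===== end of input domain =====

-- B replaces A's sort-then-scan longest-consecutive-sequence with a hash-set run-start
-- scan (objective: alternative algorithm of similar cost); return values proved equal.

-- ===== PORT A =====
def pvRankValues : PySem.Dict String Int :=
  PySem.Dict.ofList [("2",2),("3",3),("4",4),("5",5),("6",6),("7",7),("8",8),("9",9),
                     ("10",10),("Jack",11),("Queen",12),("King",13),("Ace",14)]

def pvValueToRank : PySem.Dict Int String :=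
  PySem.Dict.ofList (pvRankValues.items.map (fun p => (p.2, p.1)))

-- step of _longest_consecutive_sequence's loop; the Bool records Python's
-- 'best is current' aliasing (best = current = [values[0]] share one list object,
-- so current.append also grows best until current is rebound at the first gap)
def lcsStep (st : List Int × List Int × Bool) (value : Int) : List Int × List Int × Bool :=
  let best := st.1
  let current := st.2.1
  let aliased := st.2.2
  if value == current.getLast! then st
  else if value == current.getLast! + 1 then
    let current' := current ++ [value]
    (if aliased then current' else best, current', aliased)
  else
    ((if current.length > best.length then current else best), [value], false)

def longest_consecutive_sequence (values : List Int) : List Int :=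
  match values with
  | [] => []
  | v0 :: rest =>
    let st := rest.foldl lcsStep ([v0], [v0], true)
    if st.2.1.length > st.1.length then st.2.1 else st.1

def value_to_rank (value : Int) : Option String :=
  if value == 1 then some "Ace" else pvValueToRank.get? value

def find_best_straight_indices_py (rank_to_indices : List (String × List Int)) (subset_indices : Option (List Int)) : Int × List Int :=
  let d := PySem.Dict.ofList rank_to_indices
  let value_rank_pairs := d.items.foldl (fun (acc : List (Int × String)) p =>
      let filtered := p.2.filter (fun i =>
        match subset_indices with | none => true | some sub => sub.contains i)
      if filtered.isEmpty then acc
      else match pvRankValues.get? p.1 with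
        | none => acc
        | some value => acc ++ [(value, p.1)]) []
  if value_rank_pairs.isEmpty then (0, [])
  else
    let values := PySem.List.sorted (PySem.Set.ofList (value_rank_pairs.map (·.1))) (fun x => x) false
    let best0 := longest_consecutive_sequence values
    let best_sequence :=
      if values.contains 14 then
        let ace_low_values := PySem.List.sorted (PySem.Set.ofList (values ++ [1])) (fun x => x) false
        let ace_sequence := longest_consecutive_sequence ace_low_values
        if ace_sequence.length > best0.length then
          ace_sequence.map (fun v => if v == 1 then 14 else v)
        else best0
      else best0
    if best_sequence.length < 3 then ((best_sequence.length : Int), [])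
    else
      let st := best_sequence.foldl (fun (st : List Int × PySem.Set Int) value =>
          match value_to_rank value with
          | none => st
          | some rank =>
            if rank == "" then st
            else match d.get? rank with
              | none => st
              | some idxs =>
                -- for … break: first index passing both guards
                match idxs.find? (fun idx => !(PySem.Set.contains st.2 idx) &&
                    !(match subset_indices with | none => false | some sub => !(sub.contains idx))) with
                | none => st
                | some idx => (st.1 ++ [idx], PySem.Set.add st.2 idx)) ([], PySem.Set.empty)
      ((best_sequence.length : Int), st.1)

-- ===== PORT B =====
def run_len_go (vals : List Int) (v : Int) : Nat → Int → Int
  | 0, n => n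
  | fuel+1, n => if vals.contains (v + n) then run_len_go vals v fuel (n + 1) else n

-- 'n = 1; while v + n in vals: n += 1' — each iteration consumes a distinct member
-- of vals, so fuel = vals.length suffices and the fuel never runs out
def run_len (vals : List Int) (v : Int) : Int := run_len_go vals v vals.length 1

def bestRunStep (vals : List Int) (st : Int × Int) (v : Int) : Int × Int :=
  if !(vals.contains (v - 1)) then
    let n := run_len vals v
    if n > st.2 || (n == st.2 && v < st.1) then (v, n) else st
  else st

def best_run (vals : List Int) : Int × Int :=
  vals.foldl (bestRunStep vals) (0, 0)

def find_best_straight_indices_py_alt (rank_to_indices : List (String × List Int)) (subset_indices : Option (List Int)) : Int × List Int :=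
  let d := PySem.Dict.ofList rank_to_indices
  let present : PySem.Set Int := d.items.foldl (fun (s : PySem.Set Int) p =>
      match pvRankValues.get? p.1 with
      | some value =>
        if p.2.any (fun i =>
            match subset_indices with | none => true | some sub => sub.contains i)
        then PySem.Set.add s value else s
      | none => s) PySem.Set.empty
  if present.isEmpty then (0, [])
  else
    let br0 := best_run present
    let br := if PySem.Set.contains present 14 then
        let lr := best_run (PySem.Set.union present [1])
        if lr.2 > br0.2 then lr else br0
      else br0
    if br.2 < 3 then (br.2, [])
    else
      let st := (PySem.List.pyRange br.1 (br.1 + br.2) 1).foldl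
        (fun (st : List Int × PySem.Set Int) value =>
          let rank : Option String := if value == 1 then some "Ace" else pvValueToRank.get? value
          let idx := match rank with
            | none => none
            | some r => (d.getD r []).find? (fun i => !(PySem.Set.contains st.2 i) &&
                (match subset_indices with | none => true | some sub => sub.contains i))
          match idx with
          | none => st
          | some i => (st.1 ++ [i], PySem.Set.add st.2 i)) ([], PySem.Set.empty)
      (br.2, st.1)

-- ===== PRECONDITION & SPEC =====
def Spec_find_best_straight_indices_py (rank_to_indices : List (String × List Int)) (subset_indices : Option (List Int)) (out : Int × List Int) : Prop := out = find_best_straight_indices_py_alt rank_to_indices subset_indices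
instance (rank_to_indices : List (String × List Int)) (subset_indices : Option (List Int)) (out : Int × List Int) : Decidable (Spec_find_best_straight_indices_py rank_to_indices subset_indices out) := by unfold Spec_find_best_straight_indices_py; infer_instance

-- ===== CLAIM (what is proved, stated in full; the proofs are below) =====
def Claim_equal_find_best_straight_indices_py : Prop := ∀ (rank_to_indices : List (String × List Int)) (subset_indices : Option (List Int)), Dom_find_best_straight_indices_py rank_to_indices subset_indices → Spec_find_best_straight_indices_py rank_to_indices subset_indices (find_best_straight_indices_py rank_to_indices subset_indices)

-- ===== LEMMAS AND PROOFS =====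

-- ---------- small generic helpers ----------
theorem pvFilter_isEmpty_eq_not_any (c : Int → Bool) (xs : List Int) :
    (xs.filter c).isEmpty = !xs.any c := by
  induction xs with
  | nil => rfl
  | cons x xs ih => cases hc : c x <;> simp [hc, ih]

theorem pvFoldl_fixed {α β : Type} (f : α → β → α) (L : List β) (st : α)
    (h : ∀ st' x, x ∈ L → f st' x = st') : L.foldl f st = st := by
  induction L generalizing st with
  | nil => rfl
  | cons x L ih =>
    rw [List.foldl_cons, h st x (by simp)]
    exact ih st (fun st' y hy => h st' y (by simp [hy]))

theorem pvGetLast!_concat (xs : List Int) (x : Int) : (xs ++ [x]).getLast! = x := by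
  rw [List.getLast!_eq_getLast?_getD, List.getLast?_concat]; rfl

theorem pvGetLast!_append (xs ys : List Int) (h : ys ≠ []) :
    (xs ++ ys).getLast! = ys.getLast! := by
  rcases List.eq_nil_or_concat ys with rfl | ⟨zs, z, rfl⟩
  · exact absurd rfl h
  · simp only [List.concat_eq_append]
    rw [← List.append_assoc, pvGetLast!_concat, pvGetLast!_concat]

theorem pvContains_congr (s t : List Int) (h : ∀ x, x ∈ s ↔ x ∈ t) (x : Int) :
    s.contains x = t.contains x := by
  by_cases hx : x ∈ s
  · rw [show s.contains x = true from List.contains_iff_mem.2 hx,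
        show t.contains x = true from List.contains_iff_mem.2 ((h x).1 hx)]
  · have h1 : s.contains x ≠ true := fun hc => hx (List.contains_iff_mem.1 hc)
    have h2 : t.contains x ≠ true := fun hc => hx ((h x).2 (List.contains_iff_mem.1 hc))
    simp only [ne_eq, Bool.not_eq_true] at h1 h2
    rw [h1, h2]

-- ---------- pyRange facts ----------
theorem pvPyRange_getLast! (a b : Int) (h : a < b) :
    (PySem.List.pyRange a b 1).getLast! = b - 1 := by
  have hb : b = (b - 1) + 1 := by ring
  rw [hb, PySem.List.pyRange_one_succ_right (by omega)]
  rw [pvGetLast!_concat]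
  omega

theorem pvPyRange_ne_nil (a b : Int) (h : a < b) : PySem.List.pyRange a b 1 ≠ [] := by
  rw [PySem.List.pyRange_one_cons h]; simp

-- ---------- dictionary literal facts ----------
set_option maxHeartbeats 1000000 in
theorem pvRankValues_eq : pvRankValues = PySem.Dict.mk [("2",2),("3",3),("4",4),("5",5),("6",6),("7",7),("8",8),("9",9),("10",10),("Jack",11),("Queen",12),("King",13),("Ace",14)] := by rfl

set_option maxHeartbeats 1000000 in
theorem pvValueToRank_eq : pvValueToRank = PySem.Dict.mk [(2,"2"),(3,"3"),(4,"4"),(5,"5"),(6,"6"),(7,"7"),(8,"8"),(9,"9"),(10,"10"),(11,"Jack"),(12,"Queen"),(13,"King"),(14,"Ace")] := by rfl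

theorem pvGet?_mem_values {κ ν : Type} [BEq κ] (items : List (κ × ν)) (x : κ) (v : ν)
    (h : (PySem.Dict.mk items).get? x = some v) : v ∈ items.map (·.2) := by
  induction items with
  | nil => cases h
  | cons p rest ih =>
    obtain ⟨k, w⟩ := p
    rw [PySem.Dict.get?_mk_cons] at h
    by_cases hc : (k == x) = true
    · rw [if_pos hc, Option.some_inj] at h
      subst h; simp
    · rw [if_neg hc] at h
      simp only [List.map_cons, List.mem_cons]
      exact Or.inr (ih h)

theorem pvRank_bounds (r : String) (v : Int) (h : pvRankValues.get? r = some v) :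
    1 ≤ v ∧ v ≤ 14 := by
  rw [pvRankValues_eq] at h
  have hv := pvGet?_mem_values _ _ _ h
  simp only [List.map_cons, List.map_nil, List.mem_cons, List.not_mem_nil, or_false] at hv
  rcases hv with rfl|rfl|rfl|rfl|rfl|rfl|rfl|rfl|rfl|rfl|rfl|rfl|rfl <;> omega

theorem pvValueToRank_ne_empty (v : Int) (r : String) (h : pvValueToRank.get? v = some r) :
    (r == "") = false := by
  rw [pvValueToRank_eq] at h
  have hv := pvGet?_mem_values _ _ _ h
  simp only [List.map_cons, List.map_nil, List.mem_cons, List.not_mem_nil, or_false] at hv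
  rcases hv with rfl|rfl|rfl|rfl|rfl|rfl|rfl|rfl|rfl|rfl|rfl|rfl|rfl <;> rfl

-- ---------- run decomposition of a strictly increasing list ----------
def pvRng (p : Int × Int) : List Int := PySem.List.pyRange p.1 (p.1 + p.2) 1

def runsList : List (Int × Int) → List Int
  | [] => []
  | (s, l) :: rs => PySem.List.pyRange s (s + l) 1 ++ runsList rs

def RunsWF : Int → List (Int × Int) → Prop
  | _, [] => True
  | b, (s, l) :: rs => b ≤ s ∧ 1 ≤ l ∧ RunsWF (s + l + 1) rs

def runsOf : List Int → List (Int × Int)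
  | [] => []
  | x :: xs =>
    match runsOf xs with
    | [] => [(x, 1)]
    | (s, l) :: rs => if s = x + 1 then (x, l + 1) :: rs else (x, 1) :: (s, l) :: rs

theorem pvRunsOf_spec : ∀ xs : List Int, xs.Pairwise (· < ·) →
    runsList (runsOf xs) = xs ∧ (∀ b, (∀ y ∈ xs, b ≤ y) → RunsWF b (runsOf xs)) := by
  intro xs hp
  induction xs with
  | nil => exact ⟨rfl, fun b _ => trivial⟩
  | cons x xs ih =>
    rw [List.pairwise_cons] at hp
    obtain ⟨hlt, hpx⟩ := hp
    obtain ⟨ih1, ih2⟩ := ih hpx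
    cases hr : runsOf xs with
    | nil =>
      have hxs : xs = [] := by rw [hr] at ih1; exact ih1.symm
      subst hxs
      constructor
      · show runsList [(x, 1)] = [x]
        show PySem.List.pyRange x (x + 1) 1 ++ [] = [x]
        rw [PySem.List.pyRange_one_cons (by omega), PySem.List.pyRange_one_eq_nil (by omega)]
        rfl
      · intro b hb
        exact ⟨hb x (by simp), by omega, trivial⟩
    | cons p rs =>
      obtain ⟨s, l⟩ := p
      rw [hr] at ih1
      have hwf : RunsWF (x + 1) ((s, l) :: rs) := by
        rw [← hr]
        exact ih2 (x + 1) (fun y hy => by have := hlt y hy; omega)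
      obtain ⟨hxs1, hl1, hwfrest⟩ := hwf
      show runsList (runsOf (x :: xs)) = x :: xs ∧ _
      have hro : runsOf (x :: xs) = if s = x + 1 then (x, l + 1) :: rs else (x, 1) :: (s, l) :: rs := by
        show (match runsOf xs with
          | [] => [(x, 1)]
          | (s, l) :: rs => if s = x + 1 then (x, l + 1) :: rs else (x, 1) :: (s, l) :: rs) = _
        rw [hr]
      by_cases hs : s = x + 1
      · rw [hro, if_pos hs]
        constructor
        · show PySem.List.pyRange x (x + (l+1)) 1 ++ runsList rs = x :: xs
          rw [PySem.List.pyRange_one_cons (by omega)]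
          rw [show x + 1 = s from by omega, show x + (l + 1) = s + l from by omega]
          rw [List.cons_append]
          rw [show PySem.List.pyRange s (s + l) 1 ++ runsList rs = runsList ((s, l) :: rs) from rfl]
          rw [ih1]
        · intro b hb
          exact ⟨hb x (by simp), by omega, by rw [show x + (l+1) + 1 = s + l + 1 by omega]; exact hwfrest⟩
      · rw [hro, if_neg hs]
        constructor
        · show PySem.List.pyRange x (x + 1) 1 ++ runsList ((s, l) :: rs) = x :: xs
          rw [PySem.List.pyRange_one_cons (by omega), PySem.List.pyRange_one_eq_nil (by omega)]
          rw [ih1]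
          rfl
        · intro b hb
          exact ⟨hb x (by simp), by omega, by omega, hl1, hwfrest⟩

theorem runsList_cons (s l : Int) (rs : List (Int × Int)) :
    runsList ((s, l) :: rs) = PySem.List.pyRange s (s + l) 1 ++ runsList rs := rfl

-- ---------- facts about well-formed run lists ----------
theorem pvRunsWF_lb : ∀ (rs : List (Int × Int)) (b : Int), RunsWF b rs →
    ∀ x ∈ runsList rs, b ≤ x := by
  intro rs
  induction rs with
  | nil => intro b _ x hx; cases hx
  | cons p rest ih =>
    obtain ⟨s, l⟩ := p
    intro b hwf x hx
    obtain ⟨hb, hl, hrest⟩ := hwf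
    rw [runsList_cons, List.mem_append] at hx
    rcases hx with hx | hx
    · have := PySem.List.mem_pyRange_one.1 hx; omega
    · have := ih (s + l + 1) hrest x hx; omega

theorem pvRunsWF_start : ∀ (rs : List (Int × Int)) (b : Int), RunsWF b rs →
    ∀ p ∈ rs, b ≤ p.1 ∧ 1 ≤ p.2 := by
  intro rs
  induction rs with
  | nil => intro b _ p hp; cases hp
  | cons q rest ih =>
    obtain ⟨s, l⟩ := q
    intro b hwf p hp
    obtain ⟨hb, hl, hrest⟩ := hwf
    rcases List.mem_cons.1 hp with rfl | hp
    · exact ⟨hb, hl⟩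
    · have := ih (s + l + 1) hrest p hp; omega

theorem pvStart_pred_not_mem : ∀ (rs : List (Int × Int)) (b : Int), RunsWF b rs →
    ∀ p ∈ rs, (p.1 - 1) ∉ runsList rs := by
  intro rs
  induction rs with
  | nil => intro b _ p hp; cases hp
  | cons q rest ih =>
    obtain ⟨s, l⟩ := q
    intro b hwf p hp hmem
    obtain ⟨hb, hl, hrest⟩ := hwf
    rw [runsList_cons, List.mem_append] at hmem
    rcases List.mem_cons.1 hp with rfl | hp
    · rcases hmem with hm | hm
      · have := PySem.List.mem_pyRange_one.1 hm; simp at this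
      · have h2 := pvRunsWF_lb rest (s + l + 1) hrest _ hm; simp at h2; omega
    · have hs := pvRunsWF_start rest (s + l + 1) hrest p hp
      rcases hmem with hm | hm
      · have := PySem.List.mem_pyRange_one.1 hm; omega
      · exact ih (s + l + 1) hrest p hp hm

theorem pvEnd_not_mem : ∀ (rs : List (Int × Int)) (b : Int), RunsWF b rs →
    ∀ p ∈ rs, (p.1 + p.2) ∉ runsList rs := by
  intro rs
  induction rs with
  | nil => intro b _ p hp; cases hp
  | cons q rest ih =>
    obtain ⟨s, l⟩ := q
    intro b hwf p hp hmem
    obtain ⟨hb, hl, hrest⟩ := hwf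
    rw [runsList_cons, List.mem_append] at hmem
    rcases List.mem_cons.1 hp with rfl | hp
    · rcases hmem with hm | hm
      · have := PySem.List.mem_pyRange_one.1 hm; simp at this
      · have h2 := pvRunsWF_lb rest (s + l + 1) hrest _ hm; simp at h2
    · have hs := pvRunsWF_start rest (s + l + 1) hrest p hp
      rcases hmem with hm | hm
      · have := PySem.List.mem_pyRange_one.1 hm; omega
      · exact ih (s + l + 1) hrest p hp hm

theorem pvMid_mem : ∀ (rs : List (Int × Int)), ∀ p ∈ rs, ∀ v : Int,
    p.1 ≤ v → v < p.1 + p.2 → v ∈ runsList rs := by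
  intro rs
  induction rs with
  | nil => intro p hp; cases hp
  | cons q rest ih =>
    obtain ⟨s, l⟩ := q
    intro p hp v h1 h2
    rw [runsList_cons, List.mem_append]
    rcases List.mem_cons.1 hp with rfl | hp
    · exact Or.inl (PySem.List.mem_pyRange_one.2 ⟨h1, h2⟩)
    · exact Or.inr (ih p hp v h1 h2)

theorem pvLen_le_length : ∀ (rs : List (Int × Int)) (b : Int), RunsWF b rs →
    ∀ p ∈ rs, p.2 ≤ ((runsList rs).length : Int) := by
  intro rs
  induction rs with
  | nil => intro b _ p hp; cases hp
  | cons q rest ih =>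
    obtain ⟨s, l⟩ := q
    intro b hwf p hp
    obtain ⟨hb, hl, hrest⟩ := hwf
    rw [runsList_cons, List.length_append, PySem.List.length_pyRange_one]
    rcases List.mem_cons.1 hp with rfl | hp
    · simp only []
      omega
    · have := ih (s + l + 1) hrest p hp
      omega

-- ---------- run_len on a run decomposition ----------
theorem pvRunLenGo_spec (c : List Int) (s : Int) : ∀ (fuel : Nat) (n L : Int),
    1 ≤ n → n ≤ L → L - n ≤ (fuel : Int) →
    (∀ k : Int, n ≤ k → k < L → (s + k) ∈ c) → (s + L) ∉ c →
    run_len_go c s fuel n = L := by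
  intro fuel
  induction fuel with
  | zero =>
    intro n L h1 h2 h3 _ _
    have : n = L := by omega
    simpa [run_len_go] using this
  | succ f ih =>
    intro n L h1 h2 h3 hmem hnot
    show (if c.contains (s + n) then run_len_go c s f (n + 1) else n) = L
    by_cases hn : n = L
    · subst hn
      rw [if_neg (fun hc => hnot (List.contains_iff_mem.1 hc))]
    · rw [if_pos (List.contains_iff_mem.2 (hmem n le_rfl (by omega)))]
      exact ih (n + 1) L (by omega) (by omega) (by push_cast at h3 ⊢; omega)
        (fun k hk1 hk2 => hmem k (by omega) hk2) hnot

theorem pvRunLen_spec (RS : List (Int × Int)) (b0 : Int) (hwf : RunsWF b0 RS)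
    (p : Int × Int) (hp : p ∈ RS) : run_len (runsList RS) p.1 = p.2 := by
  have hsl := pvRunsWF_start RS b0 hwf p hp
  apply pvRunLenGo_spec (runsList RS) p.1 (runsList RS).length 1 p.2 le_rfl hsl.2
  · have := pvLen_le_length RS b0 hwf p hp; omega
  · intro k hk1 hk2
    exact pvMid_mem RS p hp (p.1 + k) (by omega) (by omega)
  · exact pvEnd_not_mem RS b0 hwf p hp

-- ---------- the LCS fold over a run decomposition ----------
def selLCS (b cur : List Int) : List Int := if cur.length > b.length then cur else b

def selRun (a r : Int × Int) : Int × Int := if r.2 > a.2 then r else a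

def lcsRunsA : (Int × Int) → (Int × Int) → List (Int × Int) → (Int × Int)
  | B, C, [] => if C.2 > B.2 then C else B
  | B, C, r :: rs => lcsRunsA (if C.2 > B.2 then C else B) r rs

theorem pvLcsRunsA_foldl : ∀ (rs : List (Int × Int)) (B C : Int × Int),
    lcsRunsA B C rs = List.foldl selRun (selRun B C) rs := by
  intro rs
  induction rs with
  | nil => intro B C; rfl
  | cons r rs ih =>
    intro B C
    show lcsRunsA (if C.2 > B.2 then C else B) r rs = _
    rw [ih]
    rfl

theorem pvGetLast!_cur_range (cur : List Int) (e l : Int) (_hcur : cur ≠ [])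
    (hlast : cur.getLast! = e) (hl : 0 ≤ l) :
    (cur ++ PySem.List.pyRange (e+1) (e+1+l) 1).getLast! = e + l := by
  by_cases h0 : l = 0
  · subst h0
    rw [PySem.List.pyRange_one_eq_nil (by omega), List.append_nil, hlast]
    omega
  · rw [pvGetLast!_append _ _ (pvPyRange_ne_nil _ _ (by omega)),
        pvPyRange_getLast! _ _ (by omega)]
    omega

theorem pvL1 (l : Int) (h0 : 0 ≤ l) : ∀ (b cur : List Int) (al : Bool) (e : Int),
    cur ≠ [] → cur.getLast! = e → (al = true → b = cur) →
    List.foldl lcsStep (b, cur, al) (PySem.List.pyRange (e+1) (e+1+l) 1) =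
      ((if al then cur ++ PySem.List.pyRange (e+1) (e+1+l) 1 else b),
        cur ++ PySem.List.pyRange (e+1) (e+1+l) 1, al) := by
  induction l, h0 using Int.le_induction with
  | base =>
    intro b cur al e hcur hlast hal
    rw [PySem.List.pyRange_one_eq_nil (by omega), List.foldl_nil, List.append_nil]
    cases al
    · rfl
    · rw [hal rfl]; simp
  | succ l hl ih =>
    intro b cur al e hcur hlast hal
    rw [show e + 1 + (l + 1) = (e + 1 + l) + 1 by ring,
        PySem.List.pyRange_one_succ_right (by omega), List.foldl_append, ih b cur al e hcur hlast hal]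
    have hlast' : (cur ++ PySem.List.pyRange (e+1) (e+1+l) 1).getLast! = e + l :=
      pvGetLast!_cur_range cur e l hcur hlast hl
    rw [List.foldl_cons, List.foldl_nil]
    show lcsStep _ (e + 1 + l) = _
    have hb1 : ((e + 1 + l) == (cur ++ PySem.List.pyRange (e+1) (e+1+l) 1).getLast!) = false := by
      rw [hlast', beq_eq_false_iff_ne]; omega
    have hb2 : ((e + 1 + l) == (cur ++ PySem.List.pyRange (e+1) (e+1+l) 1).getLast! + 1) = true := by
      rw [hlast', beq_iff_eq]; ring
    simp only [lcsStep, hb1, hb2, Bool.false_eq_true, if_false, if_true]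
    have happ : (cur ++ PySem.List.pyRange (e+1) (e+1+l) 1) ++ [e + 1 + l]
        = cur ++ PySem.List.pyRange (e+1) (e+1+l+1) 1 := by
      rw [List.append_assoc, PySem.List.pyRange_one_succ_right (show e + 1 ≤ e + 1 + l by omega)]
    cases al
    · simp only [Bool.false_eq_true, if_false]
      rw [← List.append_assoc]
    · simp only [if_true]
      rw [← List.append_assoc]

theorem pvL2 (s l : Int) (b cur : List Int) (al : Bool) (hl : 1 ≤ l) (_hcur : cur ≠ [])
    (hgap : cur.getLast! + 2 ≤ s) (_hal : al = true → b = cur) :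
    List.foldl lcsStep (b, cur, al) (PySem.List.pyRange s (s+l) 1) =
      (selLCS b cur, PySem.List.pyRange s (s+l) 1, false) := by
  rw [PySem.List.pyRange_one_cons (by omega), List.foldl_cons]
  have hstep : lcsStep (b, cur, al) s = (selLCS b cur, [s], false) := by
    have hb1 : (s == cur.getLast!) = false := by rw [beq_eq_false_iff_ne]; omega
    have hb2 : (s == cur.getLast! + 1) = false := by rw [beq_eq_false_iff_ne]; omega
    simp only [lcsStep, hb1, hb2, Bool.false_eq_true, if_false]
    rfl
  rw [hstep]
  have := pvL1 (l - 1) (by omega) (selLCS b cur) [s] false s (by simp) rfl (by simp)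
  rw [show s + 1 + (l - 1) = s + l by ring] at this
  rw [this]
  simp only [Bool.false_eq_true, if_false]
  rfl

theorem pvSelLCS_rng (B C : Int × Int) (hB : 0 ≤ B.2) (_hC : 0 ≤ C.2) :
    selLCS (pvRng B) (pvRng C) = pvRng (if C.2 > B.2 then C else B) := by
  unfold selLCS pvRng
  rw [PySem.List.length_pyRange_one, PySem.List.length_pyRange_one]
  by_cases h : C.2 > B.2
  · rw [if_pos (by omega), if_pos h]
  · rw [if_neg (by omega), if_neg h]

theorem pvL3 : ∀ (rs : List (Int × Int)) (B C : Int × Int),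
    RunsWF (C.1 + C.2 + 1) rs → 0 ≤ B.2 → 1 ≤ C.2 →
    (if (List.foldl lcsStep (pvRng B, pvRng C, false) (runsList rs)).2.1.length >
        (List.foldl lcsStep (pvRng B, pvRng C, false) (runsList rs)).1.length
     then (List.foldl lcsStep (pvRng B, pvRng C, false) (runsList rs)).2.1
     else (List.foldl lcsStep (pvRng B, pvRng C, false) (runsList rs)).1) = pvRng (lcsRunsA B C rs) := by
  intro rs
  induction rs with
  | nil =>
    intro B C _ hB hC
    show (if (pvRng C).length > (pvRng B).length then pvRng C else pvRng B) = _
    show _ = pvRng (if C.2 > B.2 then C else B)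
    unfold pvRng
    rw [PySem.List.length_pyRange_one, PySem.List.length_pyRange_one]
    by_cases h : C.2 > B.2
    · rw [if_pos (by omega), if_pos h]
    · rw [if_neg (by omega), if_neg h]
  | cons r rs ih =>
    intro B C hwf hB hC
    obtain ⟨hb, hl, hrest⟩ := hwf
    rw [runsList_cons, List.foldl_append]
    have h2 := pvL2 r.1 r.2 (pvRng B) (pvRng C) false hl
      (show pvRng C ≠ [] from pvPyRange_ne_nil C.1 (C.1 + C.2) (by omega))
      (show (pvRng C).getLast! + 2 ≤ r.1 from by
        show (PySem.List.pyRange C.1 (C.1 + C.2) 1).getLast! + 2 ≤ r.1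
        rw [pvPyRange_getLast! _ _ (by omega)]
        omega)
      (by simp)
    rw [h2, pvSelLCS_rng B C hB (by omega)]
    exact ih (if C.2 > B.2 then C else B) r hrest
      (by by_cases h : C.2 > B.2 <;> simp [h] <;> omega) hl

-- ---------- the best_run fold over a run decomposition ----------
theorem pvL4 (RS : List (Int × Int)) (b0 : Int) (hwf : RunsWF b0 RS) :
    ∀ (rs : List (Int × Int)) (bnd : Int) (acc : Int × Int), RunsWF bnd rs →
    (∀ r ∈ rs, r ∈ RS) → acc.1 < bnd → 0 ≤ acc.2 →
    List.foldl (bestRunStep (runsList RS)) acc (runsList rs) = List.foldl selRun acc rs := by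
  intro rs
  induction rs with
  | nil => intro bnd acc _ _ _ _; rfl
  | cons r rs ih =>
    intro bnd acc hwfr hsub hacc1 hacc2
    obtain ⟨hb, hl, hrest⟩ := hwfr
    have hrRS : r ∈ RS := hsub r (by simp)
    rw [runsList_cons, List.foldl_append, PySem.List.pyRange_one_cons (by omega), List.foldl_cons]
    have hpred : (runsList RS).contains (r.1 - 1) = false := by
      have hnot := pvStart_pred_not_mem RS b0 hwf r hrRS
      cases hc : (runsList RS).contains (r.1 - 1)
      · rfl
      · exact absurd (List.contains_iff_mem.1 hc) hnot
    have hstep : bestRunStep (runsList RS) acc r.1 = selRun acc r := by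
      unfold bestRunStep
      rw [hpred]
      rw [pvRunLen_spec RS b0 hwf r hrRS]
      have hlt : decide (r.1 < acc.1) = false := decide_eq_false (by omega)
      rw [hlt]
      simp only [Bool.not_false, if_true, Bool.and_false, Bool.or_false]
      unfold selRun
      by_cases h : r.2 > acc.2
      · rw [if_pos (by simpa using h), if_pos h]
      · rw [if_neg (by simpa using h), if_neg h]
    rw [hstep]
    have hskip : List.foldl (bestRunStep (runsList RS)) (selRun acc r) (PySem.List.pyRange (r.1 + 1) (r.1 + r.2) 1) = selRun acc r := by
      apply pvFoldl_fixed
      intro st x hx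
      have hxb := PySem.List.mem_pyRange_one.1 hx
      have hmem : (x - 1) ∈ runsList RS := pvMid_mem RS r hrRS (x - 1) (by omega) (by omega)
      unfold bestRunStep
      rw [List.contains_iff_mem.2 hmem]
      rfl
    rw [hskip]
    have hsel1 : (selRun acc r).1 < r.1 + r.2 + 1 := by
      unfold selRun; by_cases h : r.2 > acc.2 <;> simp [h] <;> omega
    have hsel2 : 0 ≤ (selRun acc r).2 := by
      unfold selRun; by_cases h : r.2 > acc.2 <;> simp [h] <;> omega
    exact ih (r.1 + r.2 + 1) (selRun acc r) hrest (fun q hq => hsub q (by simp [hq])) hsel1 hsel2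

-- ---------- best_run is invariant under permutation ----------
theorem pvRunLenGo_congr (s t : List Int) (hmem : ∀ x, x ∈ s ↔ x ∈ t) (v : Int) :
    ∀ (fuel : Nat) (n : Int), run_len_go s v fuel n = run_len_go t v fuel n := by
  intro fuel
  induction fuel with
  | zero => intro n; rfl
  | succ f ih =>
    intro n
    show (if s.contains (v + n) then run_len_go s v f (n + 1) else n)
       = (if t.contains (v + n) then run_len_go t v f (n + 1) else n)
    rw [pvContains_congr s t hmem (v + n), ih (n + 1)]

theorem pvBestRunStep_congr (s t : List Int) (hmem : ∀ x, x ∈ s ↔ x ∈ t)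
    (hlen : s.length = t.length) (st : Int × Int) (v : Int) :
    bestRunStep s st v = bestRunStep t st v := by
  unfold bestRunStep
  rw [pvContains_congr s t hmem (v - 1)]
  unfold run_len
  rw [hlen, pvRunLenGo_congr s t hmem v t.length 1]

theorem pvBestRunStep_comm (vals : List Int) (st : Int × Int) (a b : Int) :
    bestRunStep vals (bestRunStep vals st a) b = bestRunStep vals (bestRunStep vals st b) a := by
  unfold bestRunStep
  by_cases ha : vals.contains (a - 1) <;> by_cases hb : vals.contains (b - 1) <;>
    simp only [ha, hb, Bool.not_true, Bool.not_false, Bool.false_eq_true, if_false, if_true]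
  obtain ⟨s1, s2⟩ := st
  split_ifs <;>
    simp_all only [Bool.or_eq_true, Bool.and_eq_true, decide_eq_true_eq, beq_iff_eq,
      Bool.not_eq_true, Prod.mk.injEq] <;>
    first
      | rfl
      | omega

theorem pvBestRun_perm (s t : List Int) (hp : s.Perm t) : best_run s = best_run t := by
  unfold best_run
  haveI : RightCommutative (bestRunStep s) := ⟨fun st a b => pvBestRunStep_comm s st a b⟩
  rw [hp.foldl_eq (0, 0)]
  exact List.foldl_ext _ _ _ (fun acc x _ =>
    pvBestRunStep_congr s t (fun y => hp.mem_iff) hp.length_eq acc x)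

-- ---------- invariants of the selection fold ----------
theorem pvSelFold_len : ∀ (rs : List (Int × Int)) (acc : Int × Int), 1 ≤ acc.2 →
    1 ≤ (List.foldl selRun acc rs).2 := by
  intro rs
  induction rs with
  | nil => intro acc h; exact h
  | cons r rs ih =>
    intro acc h
    rw [List.foldl_cons]
    apply ih
    unfold selRun
    by_cases hr : r.2 > acc.2 <;> simp [hr] <;> omega

theorem pvSelFold_mem : ∀ (rs : List (Int × Int)) (acc : Int × Int),
    List.foldl selRun acc rs = acc ∨ (List.foldl selRun acc rs) ∈ rs := by
  intro rs
  induction rs with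
  | nil => intro acc; exact Or.inl rfl
  | cons r rs ih =>
    intro acc
    rw [List.foldl_cons]
    rcases ih (selRun acc r) with h | h
    · rw [h]
      unfold selRun
      by_cases hr : r.2 > acc.2
      · rw [if_pos hr]; exact Or.inr (by simp)
      · rw [if_neg hr]; exact Or.inl rfl
    · exact Or.inr (by simp [h])

-- ---------- the core characterisation ----------
theorem pvCore (c : List Int) (hp : c.Pairwise (· < ·)) (hlb : ∀ x ∈ c, 1 ≤ x) (hne : c ≠ []) :
    longest_consecutive_sequence c = pvRng (best_run c)
    ∧ ((longest_consecutive_sequence c).length : Int) = (best_run c).2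
    ∧ 1 ≤ (best_run c).2
    ∧ (∀ v ∈ longest_consecutive_sequence c, v ∈ c) := by
  obtain ⟨hlist, hwfall⟩ := pvRunsOf_spec c hp
  cases hro : runsOf c with
  | nil => rw [hro] at hlist; exact absurd hlist.symm hne
  | cons p rs =>
    obtain ⟨s0, l0⟩ := p
    rw [hro] at hlist
    have hwf : RunsWF 1 ((s0, l0) :: rs) := by rw [← hro]; exact hwfall 1 hlb
    obtain ⟨hs0, hl0, hwfrest⟩ := hwf
    -- B side
    have hbr : best_run c = List.foldl selRun (s0, l0) rs := by
      unfold best_run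
      conv_lhs => rw [← hlist]
      rw [pvL4 ((s0, l0) :: rs) 1 ⟨hs0, hl0, hwfrest⟩ ((s0, l0) :: rs) 1 (0, 0)
        ⟨hs0, hl0, hwfrest⟩ (fun r hr => hr) (by norm_num) (by norm_num)]
      rw [List.foldl_cons]
      congr 1
      unfold selRun
      rw [if_pos (by omega)]
    -- A side
    have hlcs : longest_consecutive_sequence c = pvRng (List.foldl selRun (s0, l0) rs) := by
      have hc2 : c = s0 :: (PySem.List.pyRange (s0 + 1) (s0 + l0) 1 ++ runsList rs) := by
        rw [← hlist, runsList_cons, PySem.List.pyRange_one_cons (by omega), List.cons_append]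
      rw [hc2]
      show (let st := List.foldl lcsStep ([s0], [s0], true)
              (PySem.List.pyRange (s0 + 1) (s0 + l0) 1 ++ runsList rs)
            if st.2.1.length > st.1.length then st.2.1 else st.1) = _
      rw [List.foldl_append]
      have h1 := pvL1 (l0 - 1) (by omega) [s0] [s0] true s0 (by simp) rfl (fun _ => rfl)
      rw [show s0 + 1 + (l0 - 1) = s0 + l0 by ring] at h1
      rw [h1]
      simp only [if_true]
      have hcur0 : ([s0] : List Int) ++ PySem.List.pyRange (s0 + 1) (s0 + l0) 1 = pvRng (s0, l0) := by
        unfold pvRng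
        rw [PySem.List.pyRange_one_cons (show s0 < s0 + l0 by omega)]
        rfl
      rw [hcur0]
      cases rs with
      | nil =>
        show (if (pvRng (s0, l0)).length > (pvRng (s0, l0)).length then _ else _) = _
        rw [if_neg (by omega)]
        rfl
      | cons r rs' =>
        obtain ⟨hbr1, hlr1, hwfr'⟩ := hwfrest
        have h2 := pvL2 r.1 r.2 (pvRng (s0, l0)) (pvRng (s0, l0)) true hlr1
          (pvPyRange_ne_nil s0 (s0 + l0) (by omega))
          (by unfold pvRng
              show (PySem.List.pyRange s0 (s0 + l0) 1).getLast! + 2 ≤ r.1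
              rw [pvPyRange_getLast! _ _ (by omega)]
              omega)
          (fun _ => rfl)
        rw [runsList_cons, List.foldl_append]
        rw [h2]
        have hself : selLCS (pvRng (s0, l0)) (pvRng (s0, l0)) = pvRng (s0, l0) := by
          unfold selLCS
          rw [if_neg (by omega)]
        rw [hself]
        rw [show PySem.List.pyRange r.1 (r.1 + r.2) 1 = pvRng r from rfl]
        have h3 := pvL3 rs' (s0, l0) r hwfr' (by omega) hlr1
        rw [h3]
        rw [pvLcsRunsA_foldl rs' (s0, l0) r]
        rw [show selRun (s0, l0) r = selRun (selRun (0,0) (s0,l0)) r from by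
          unfold selRun
          rw [if_pos (show (s0, l0).2 > (0,0).2 by omega)]]
        rw [show List.foldl selRun (selRun (selRun (0,0) (s0,l0)) r) rs'
            = List.foldl selRun (selRun (0,0) (s0,l0)) (r :: rs') from rfl]
        rw [show selRun (0,0) (s0,l0) = (s0,l0) from by
          unfold selRun; rw [if_pos (by omega)]]
    -- combine
    have hlen1 : 1 ≤ (List.foldl selRun (s0, l0) rs).2 := pvSelFold_len rs (s0, l0) hl0
    have hmemRS : (List.foldl selRun (s0, l0) rs) ∈ (s0, l0) :: rs := by
      rcases pvSelFold_mem rs (s0, l0) with h | h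
      · rw [h]; simp
      · simp [h]
    refine ⟨by rw [hlcs, hbr], ?_, ?_, ?_⟩
    · rw [hlcs, hbr]
      unfold pvRng
      rw [PySem.List.length_pyRange_one]
      omega
    · rw [hbr]; exact hlen1
    · intro v hv
      rw [hlcs] at hv
      unfold pvRng at hv
      have hvb := PySem.List.mem_pyRange_one.1 hv
      rw [← hlist]
      exact pvMid_mem ((s0, l0) :: rs) _ hmemRS v (by omega) (by omega)

-- ---------- named forms of the two port bodies (definitionally equal to the ports) ----------
def pvCond (sub : Option (List Int)) (i : Int) : Bool :=
  match sub, i with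
  | none, _ => true
  | some s, i => s.contains i

def pvStepA (sub : Option (List Int)) (acc : List (Int × String)) (p : String × List Int) :
    List (Int × String) :=
  let filtered := p.2.filter (pvCond sub)
  if filtered.isEmpty then acc
  else match pvRankValues.get? p.1 with
    | none => acc
    | some value => acc ++ [(value, p.1)]

def pvStepB (sub : Option (List Int)) (s : PySem.Set Int) (p : String × List Int) :
    PySem.Set Int :=
  match pvRankValues.get? p.1 with
  | some value =>
    if p.2.any (fun i => match sub with | none => true | some s => s.contains i)
    then PySem.Set.add s value else s
  | none => s

def pvFinA (d : PySem.Dict String (List Int)) (sub : Option (List Int))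
    (st : List Int × PySem.Set Int) (value : Int) : List Int × PySem.Set Int :=
  match value_to_rank value with
  | none => st
  | some rank =>
    if rank == "" then st
    else match d.get? rank with
      | none => st
      | some idxs =>
        match idxs.find? (fun idx => !(PySem.Set.contains st.2 idx) &&
            !(match sub with | none => false | some s => !(s.contains idx))) with
        | none => st
        | some idx => (st.1 ++ [idx], PySem.Set.add st.2 idx)

def pvFinB (d : PySem.Dict String (List Int)) (sub : Option (List Int))
    (st : List Int × PySem.Set Int) (value : Int) : List Int × PySem.Set Int :=
  let rank : Option String := if value == 1 then some "Ace" else pvValueToRank.get? value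
  let idx := match rank with
    | none => none
    | some r => (d.getD r []).find? (fun i => !(PySem.Set.contains st.2 i) &&
        (match sub with | none => true | some s => s.contains i))
  match idx with
  | none => st
  | some i => (st.1 ++ [i], PySem.Set.add st.2 i)

def pvA (rank_to_indices : List (String × List Int)) (subset_indices : Option (List Int)) : Int × List Int :=
  let d := PySem.Dict.ofList rank_to_indices
  let value_rank_pairs := d.items.foldl (pvStepA subset_indices) []
  if value_rank_pairs.isEmpty then (0, [])
  else
    let values := PySem.List.sorted (PySem.Set.ofList (value_rank_pairs.map (·.1))) (fun x => x) false
    let best0 := longest_consecutive_sequence values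
    let best_sequence :=
      if values.contains 14 then
        let ace_low_values := PySem.List.sorted (PySem.Set.ofList (values ++ [1])) (fun x => x) false
        let ace_sequence := longest_consecutive_sequence ace_low_values
        if ace_sequence.length > best0.length then
          ace_sequence.map (fun v => if v == 1 then 14 else v)
        else best0
      else best0
    if best_sequence.length < 3 then ((best_sequence.length : Int), [])
    else
      let st := best_sequence.foldl (pvFinA d subset_indices) ([], PySem.Set.empty)
      ((best_sequence.length : Int), st.1)

def pvB (rank_to_indices : List (String × List Int)) (subset_indices : Option (List Int)) : Int × List Int :=
  let d := PySem.Dict.ofList rank_to_indices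
  let present : PySem.Set Int := d.items.foldl (pvStepB subset_indices) PySem.Set.empty
  if present.isEmpty then (0, [])
  else
    let br0 := best_run present
    let br := if PySem.Set.contains present 14 then
        let lr := best_run (PySem.Set.union present [1])
        if lr.2 > br0.2 then lr else br0
      else br0
    if br.2 < 3 then (br.2, [])
    else
      let st := (PySem.List.pyRange br.1 (br.1 + br.2) 1).foldl
        (pvFinB d subset_indices) ([], PySem.Set.empty)
      (br.2, st.1)

theorem pvA_eq (rti : List (String × List Int)) (sub : Option (List Int)) :
    find_best_straight_indices_py rti sub = pvA rti sub := by
  unfold find_best_straight_indices_py pvA pvStepA pvFinA pvCond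
  rfl

theorem pvB_eq (rti : List (String × List Int)) (sub : Option (List Int)) :
    find_best_straight_indices_py_alt rti sub = pvB rti sub := by
  unfold find_best_straight_indices_py_alt pvB pvStepB pvFinB
  rfl

-- ---------- the collected values coincide ----------
theorem pvPresent_pairs (sub : Option (List Int)) : ∀ (items : List (String × List Int)) (acc : List (Int × String)),
    List.foldl (pvStepB sub) (PySem.Set.ofList (acc.map (·.1))) items
      = PySem.Set.ofList ((List.foldl (pvStepA sub) acc items).map (·.1)) := by
  intro items
  induction items with
  | nil => intro acc; rfl
  | cons p items ih =>
    intro acc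
    rw [List.foldl_cons, List.foldl_cons]
    have hstep : pvStepB sub (PySem.Set.ofList (acc.map (·.1))) p
        = PySem.Set.ofList ((pvStepA sub acc p).map (·.1)) := by
      rcases sub with _ | sublist
      · simp only [pvStepA, pvStepB]
        rw [show pvCond none = (fun _ : Int => true) from by funext i; rfl]
        rw [pvFilter_isEmpty_eq_not_any]
        generalize pvRankValues.get? p.1 = o
        rcases o with _ | v
        · cases hany : p.2.any (fun _ : Int => true) <;> simp_all
        · cases hany : p.2.any (fun _ : Int => true)
          · simp_all
          · simp_all [PySem.Set.ofList_append_singleton]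
      · simp only [pvStepA, pvStepB]
        rw [show pvCond (some sublist) = (fun i : Int => sublist.contains i) from by funext i; rfl]
        rw [pvFilter_isEmpty_eq_not_any]
        generalize pvRankValues.get? p.1 = o
        rcases o with _ | v
        · cases hany : p.2.any (fun i : Int => sublist.contains i) <;> simp_all
        · cases hany : p.2.any (fun i : Int => sublist.contains i)
          · simp_all
          · simp_all [PySem.Set.ofList_append_singleton]
    rw [hstep]
    exact ih (pvStepA sub acc p)

theorem pvPairs_bounds (sub : Option (List Int)) : ∀ (items : List (String × List Int)) (acc : List (Int × String)),
    (∀ q ∈ acc, 1 ≤ q.1 ∧ q.1 ≤ 14) →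
    ∀ q ∈ List.foldl (pvStepA sub) acc items, 1 ≤ q.1 ∧ q.1 ≤ 14 := by
  intro items
  induction items with
  | nil => intro acc h; exact h
  | cons p items ih =>
    intro acc h
    rw [List.foldl_cons]
    apply ih
    intro q hq
    unfold pvStepA at hq
    by_cases hf : (p.2.filter (pvCond sub)).isEmpty = true
    · rw [if_pos hf] at hq; exact h q hq
    · rw [if_neg hf] at hq
      cases hv : pvRankValues.get? p.1 with
      | none => simp only [hv] at hq; exact h q hq
      | some v =>
        simp only [hv] at hq
        rcases List.mem_append.1 hq with hq | hq
        · exact h q hq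
        · have : q = (v, p.1) := by simpa using hq
          subst this
          exact pvRank_bounds p.1 v hv

-- ---------- the per-value steps of the index loops coincide ----------
theorem pvFin_tail_eq (d : PySem.Dict String (List Int)) (sub : Option (List Int))
    (st : List Int × PySem.Set Int) (rank : String) :
    (match d.get? rank with
      | none => st
      | some idxs =>
        match idxs.find? (fun idx => !(PySem.Set.contains st.2 idx) &&
            !(match sub with | none => false | some s => !(s.contains idx))) with
        | none => st
        | some idx => (st.1 ++ [idx], PySem.Set.add st.2 idx)) =
    (match (d.getD rank []).find? (fun i => !(PySem.Set.contains st.2 i) &&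
        (match sub with | none => true | some s => s.contains i)) with
      | none => st
      | some i => (st.1 ++ [i], PySem.Set.add st.2 i)) := by
  have hpred : (fun idx => !(PySem.Set.contains st.2 idx) &&
      !(match sub with | none => false | some s => !(s.contains idx))) =
      (fun i => !(PySem.Set.contains st.2 i) &&
      (match sub with | none => true | some s => s.contains i)) := by
    funext i
    cases sub <;> simp
  rw [hpred]
  cases hg : d.get? rank with
  | none =>
    have : d.getD rank [] = [] := by unfold PySem.Dict.getD; rw [hg]; rfl
    rw [this]
    rfl
  | some idxs =>
    have : d.getD rank [] = idxs := by unfold PySem.Dict.getD; rw [hg]; rfl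
    rw [this]

theorem pvFin_eq (d : PySem.Dict String (List Int)) (sub : Option (List Int))
    (st : List Int × PySem.Set Int) (v : Int) :
    pvFinA d sub st v = pvFinB d sub st v := by
  unfold pvFinA pvFinB
  by_cases hv : (v == 1) = true
  · have h1 : value_to_rank v = some "Ace" := by unfold value_to_rank; rw [if_pos hv]
    simp only [h1, hv, if_true]
    rw [show (("Ace" : String) == "") = false from rfl]
    simp only [Bool.false_eq_true, if_false]
    exact pvFin_tail_eq d sub st "Ace"
  · have h1 : value_to_rank v = pvValueToRank.get? v := by
      unfold value_to_rank; rw [if_neg (by simpa using hv)]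
    simp only [h1, hv, Bool.false_eq_true, if_false]
    have hne := pvValueToRank_ne_empty v
    generalize hg : pvValueToRank.get? v = o at hne
    cases o with
    | none => rfl
    | some r =>
      simp only [hne r rfl, Bool.false_eq_true, if_false]
      exact pvFin_tail_eq d sub st r

theorem pvFinB_14_eq_1 (d : PySem.Dict String (List Int)) (sub : Option (List Int))
    (st : List Int × PySem.Set Int) :
    pvFinB d sub st 14 = pvFinB d sub st 1 := by
  unfold pvFinB
  rw [show ((14 : Int) == 1) = false from rfl, show ((1 : Int) == 1) = true from rfl]
  rw [show pvValueToRank.get? 14 = some "Ace" from by rw [pvValueToRank_eq]; rfl]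
  simp

theorem pvFin_eq' (d : PySem.Dict String (List Int)) (sub : Option (List Int))
    (st : List Int × PySem.Set Int) (v : Int) :
    pvFinA d sub st (if v == 1 then (14 : Int) else v) = pvFinB d sub st v := by
  by_cases hv : (v == 1) = true
  · rw [if_pos hv, pvFin_eq d sub st 14, pvFinB_14_eq_1]
    have : v = 1 := by simpa using hv
    rw [this]
  · rw [if_neg (by simpa using hv), pvFin_eq]

-- ---------- main equivalence ----------
theorem pvAB (rti : List (String × List Int)) (sub : Option (List Int)) :
    pvA rti sub = pvB rti sub := by
  simp only [pvA, pvB, PySem.Set.contains_eq_listContains]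
  set d := PySem.Dict.ofList rti with hd
  set pairs := List.foldl (pvStepA sub) [] d.items with hpairsdef
  have hpres : List.foldl (pvStepB sub) PySem.Set.empty d.items
      = PySem.Set.ofList (List.map (fun x => x.1) pairs) := pvPresent_pairs sub d.items []
  rw [hpres]
  set P : PySem.Set Int := PySem.Set.ofList (List.map (fun x => x.1) pairs) with hPdef
  have hPb : ∀ x ∈ P, 1 ≤ x ∧ x ≤ 14 := by
    intro x hx
    rw [hPdef] at hx
    have hx' := (PySem.Set.mem_ofList _ _).1 hx
    obtain ⟨q, hq, rfl⟩ := List.mem_map.1 hx'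
    exact pvPairs_bounds sub d.items [] (by intro r hr; cases hr) q hq
  by_cases hp0 : pairs.isEmpty = true
  · have hpairs_nil : pairs = [] := List.isEmpty_iff.1 hp0
    have hP0 : P.isEmpty = true := by rw [hPdef, hpairs_nil]; rfl
    rw [if_pos hp0, if_pos hP0]
  · have hpne : pairs ≠ [] := fun h => hp0 (List.isEmpty_iff.2 h)
    obtain ⟨q, hq⟩ := List.exists_mem_of_ne_nil pairs hpne
    have hqP : q.1 ∈ P := by
      rw [hPdef]
      exact (PySem.Set.mem_ofList _ _).2 (List.mem_map_of_mem hq)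
    have hPne : P ≠ [] := List.ne_nil_of_mem hqP
    rw [if_neg hp0, if_neg (show ¬ P.isEmpty = true from fun h => hPne (List.isEmpty_iff.1 h))]
    set V := PySem.List.sorted P (fun x => x) false with hVdef
    have hVpair : V.Pairwise (· < ·) := by
      rw [hVdef, hPdef]; exact PySem.List.sorted_ofList_pairwise_lt _
    have hVmem : ∀ x : Int, x ∈ V ↔ x ∈ P := fun x => PySem.List.mem_sorted _ _ _ _
    have hVnodup : V.Nodup := hVpair.imp (fun h => ne_of_lt h)
    have hPnodup : P.Nodup := by rw [hPdef]; exact PySem.Set.nodup_ofList _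
    have hVperm : V.Perm P := (List.perm_ext_iff_of_nodup hVnodup hPnodup).2 hVmem
    have hbrP : best_run P = best_run V := (pvBestRun_perm V P hVperm).symm
    have hVne : V ≠ [] := List.ne_nil_of_mem ((hVmem q.1).2 hqP)
    obtain ⟨e1, e2, -, -⟩ := pvCore V hVpair (fun x hx => (hPb x ((hVmem x).1 hx)).1) hVne
    rw [hbrP]
    rw [pvContains_congr V P hVmem 14]
    by_cases h14 : List.contains P 14 = true
    · simp only [h14, if_true]
      set ALV := PySem.List.sorted (PySem.Set.ofList (V ++ [1])) (fun x => x) false with hALVdef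
      set B2 := PySem.Set.union P [1] with hB2def
      have hApair : ALV.Pairwise (· < ·) := PySem.List.sorted_ofList_pairwise_lt _
      have hAmem : ∀ x : Int, x ∈ ALV ↔ x ∈ P ∨ x = 1 := by
        intro x
        rw [hALVdef]
        simp [PySem.List.mem_sorted, PySem.Set.mem_ofList, hVmem x]
      have hB2mem : ∀ x : Int, x ∈ B2 ↔ x ∈ P ∨ x = 1 := by
        intro x; rw [hB2def]; simp [PySem.Set.mem_union]
      have hAB2 : ∀ x : Int, x ∈ ALV ↔ x ∈ B2 := fun x => (hAmem x).trans (hB2mem x).symm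
      have hAnodup : ALV.Nodup := hApair.imp (fun h => ne_of_lt h)
      have hB2nodup : B2.Nodup := by rw [hB2def]; exact PySem.Set.nodup_union _ _ hPnodup
      have hAperm : ALV.Perm B2 := (List.perm_ext_iff_of_nodup hAnodup hB2nodup).2 hAB2
      have hbr2 : best_run B2 = best_run ALV := (pvBestRun_perm ALV B2 hAperm).symm
      rw [hbr2]
      have hAne : ALV ≠ [] := List.ne_nil_of_mem ((hAmem 1).2 (Or.inr rfl))
      obtain ⟨f1, f2, -, -⟩ := pvCore ALV hApair
        (fun x hx => by rcases (hAmem x).1 hx with h | h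
                        · exact (hPb x h).1
                        · omega) hAne
      by_cases hgt : (longest_consecutive_sequence ALV).length > (longest_consecutive_sequence V).length
      · rw [if_pos hgt, if_pos (show (best_run ALV).2 > (best_run V).2 by omega)]
        rw [List.length_map]
        by_cases hl3 : (longest_consecutive_sequence ALV).length < 3
        · rw [if_pos hl3, if_pos (show (best_run ALV).2 < 3 by omega), f2]
        · rw [if_neg hl3, if_neg (show ¬ (best_run ALV).2 < 3 by omega)]
          rw [show PySem.List.pyRange (best_run ALV).1 ((best_run ALV).1 + (best_run ALV).2) 1
              = longest_consecutive_sequence ALV from by rw [f1]; rfl]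
          rw [List.foldl_map]
          have hst : List.foldl (fun st v => pvFinA d sub st (if v == 1 then (14:Int) else v))
              ([], PySem.Set.empty) (longest_consecutive_sequence ALV)
              = List.foldl (pvFinB d sub) ([], PySem.Set.empty) (longest_consecutive_sequence ALV) :=
            List.foldl_ext _ _ _ (fun a x _ => pvFin_eq' d sub a x)
          rw [hst, f2]
      · rw [if_neg hgt, if_neg (show ¬ (best_run ALV).2 > (best_run V).2 by omega)]
        by_cases hl3 : (longest_consecutive_sequence V).length < 3
        · rw [if_pos hl3, if_pos (show (best_run V).2 < 3 by omega), e2]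
        · rw [if_neg hl3, if_neg (show ¬ (best_run V).2 < 3 by omega)]
          rw [show PySem.List.pyRange (best_run V).1 ((best_run V).1 + (best_run V).2) 1
              = longest_consecutive_sequence V from by rw [e1]; rfl]
          have hst : List.foldl (pvFinA d sub) ([], PySem.Set.empty) (longest_consecutive_sequence V)
              = List.foldl (pvFinB d sub) ([], PySem.Set.empty) (longest_consecutive_sequence V) :=
            List.foldl_ext _ _ _ (fun a x _ => pvFin_eq d sub a x)
          rw [hst, e2]
    · have h14' : List.contains P 14 = false := by
        cases hc : List.contains P 14
        · rfl
        · exact absurd hc h14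
      simp only [h14', Bool.false_eq_true, if_false]
      by_cases hl3 : (longest_consecutive_sequence V).length < 3
      · rw [if_pos hl3, if_pos (show (best_run V).2 < 3 by omega), e2]
      · rw [if_neg hl3, if_neg (show ¬ (best_run V).2 < 3 by omega)]
        rw [show PySem.List.pyRange (best_run V).1 ((best_run V).1 + (best_run V).2) 1
            = longest_consecutive_sequence V from by rw [e1]; rfl]
        have hst : List.foldl (pvFinA d sub) ([], PySem.Set.empty) (longest_consecutive_sequence V)
            = List.foldl (pvFinB d sub) ([], PySem.Set.empty) (longest_consecutive_sequence V) :=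
          List.foldl_ext _ _ _ (fun a x _ => pvFin_eq d sub a x)
        rw [hst, e2]

-- ===== VERDICT (by name: the statement is the Claim_ definition above) =====
theorem find_best_straight_indices_py_spec : Claim_equal_find_best_straight_indices_py := by
  intro rti sub _
  unfold Spec_find_best_straight_indices_py
  rw [pvA_eq, pvB_eq, pvAB]
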